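-- pv_equiv track=rewrite | github.com/Beyond-Procwise/procwise_agents | services/email_watcher.py | _filters_should_expand_limit
-- ===== SOURCE A (Python) =====
-- from typing import Callable, Dict, Iterable, List, Optional, Protocol, Sequence, Set, Tuple
--
-- def _filters_should_expand_limit(match_filters: Dict[str, object]) -> bool:
--     if not match_filters:
--         return False
--
--     active_keys = {
--         key
--         for key, value in match_filters.items()
--         if value not in (None, "", [], {}, ())
--     }
--     if not active_keys:
--         return False
--
--     expand_keys = {"supplier_id", "rfq_id"}
--     if active_keys & expand_keys:
--         return True
--
--     workflow_keys = {
--         "workflow_id",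
--         "action_id",
--         "draft_action_id",
--         "email_action_id",
--     }
--     return bool(active_keys <= workflow_keys and active_keys)
-- ===== SOURCE B (Python) =====
-- _RANK = {
--     "supplier_id": 2,
--     "rfq_id": 2,
--     "workflow_id": 0,
--     "action_id": 0,
--     "draft_action_id": 0,
--     "email_action_id": 0,
-- }
--
--
-- def _filters_should_expand_limit(match_filters):
--     if not match_filters:
--         return False
--     scores = [
--         _RANK.get(key, 1)
--         for key, value in match_filters.items()
--         if value not in (None, "", [], {}, ())
--     ]
--     if not scores:
--         return False
--     return max(scores) != 1
-- ===== Notes on version B (the rewrite author's own statement) =====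
-- stated objective: alternative
-- what changed: Replaces A's active-key set plus set intersection/subset algebra with a rank table (expand keys=2, workflow keys=0, others=1) mapped over the active items followed by a single max reduction: the answer is max(scores) != 1.
import Mathlib
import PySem

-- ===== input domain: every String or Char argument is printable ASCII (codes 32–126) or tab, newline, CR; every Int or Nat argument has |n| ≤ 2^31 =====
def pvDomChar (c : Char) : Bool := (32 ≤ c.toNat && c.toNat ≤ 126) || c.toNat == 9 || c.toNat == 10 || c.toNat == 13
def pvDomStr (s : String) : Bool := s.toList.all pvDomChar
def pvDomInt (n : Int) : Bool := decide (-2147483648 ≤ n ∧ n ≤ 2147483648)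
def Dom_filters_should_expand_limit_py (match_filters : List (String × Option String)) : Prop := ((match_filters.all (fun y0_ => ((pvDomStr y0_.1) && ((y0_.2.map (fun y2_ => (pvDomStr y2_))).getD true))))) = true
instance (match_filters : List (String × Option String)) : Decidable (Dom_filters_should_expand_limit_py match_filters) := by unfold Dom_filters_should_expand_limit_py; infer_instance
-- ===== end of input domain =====

-- B replaces A's active-key set and set intersection/subset algebra with a rank table
-- (expand keys=2, workflow keys=0, others=1) mapped over the active items and a single
-- max reduction: the answer is max(scores) != 1 (alternative decomposition; same O(n) cost).


-- ===== PORT A =====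
-- value not in (None, "", [], {}, ()) : for an Option String value this means "some nonempty string"
def pvActive (p : String × Option String) : Bool := !(p.2 == none || p.2 == some "")

def pvExpandKey (k : String) : Bool := k == "supplier_id" || k == "rfq_id"

def pvWorkflowKey (k : String) : Bool :=
  k == "workflow_id" || k == "action_id" || k == "draft_action_id" || k == "email_action_id"

-- Port of A: dict semantics via PySem.Dict (duplicate keys overwrite), active_keys as a PySem.Set
def filters_should_expand_limit_py (match_filters : List (String × Option String)) : Bool :=
  if match_filters = [] then false
  else
    let items := (PySem.Dict.ofList match_filters).items
    let active_keys := PySem.Set.ofList ((items.filter pvActive).map (·.1))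
    if active_keys = [] then false
    else if active_keys.any pvExpandKey then true
    else active_keys.all pvWorkflowKey && !active_keys.isEmpty

-- ===== PORT B =====
-- the _RANK table of Source B
def pvRank : PySem.Dict String Int :=
  PySem.Dict.ofList [("supplier_id", 2), ("rfq_id", 2), ("workflow_id", 0),
                     ("action_id", 0), ("draft_action_id", 0), ("email_action_id", 0)]

-- Port of B: map _RANK.get(key, 1) over the active items, then max(scores) != 1
def filters_should_expand_limit_py_alt (match_filters : List (String × Option String)) : Bool :=
  if match_filters = [] then false
  else
    let scores := ((PySem.Dict.ofList match_filters).items.filter pvActive).map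
      (fun p => pvRank.getD p.1 1)
    if scores = [] then false
    else
      match PySem.List.max? scores (fun x => x) with
      | some m => m != 1
      | none => false  -- unreachable: scores ≠ [] is guarded above

-- ===== PRECONDITION & SPEC =====
def Spec_filters_should_expand_limit_py (match_filters : List (String × Option String)) (out : Bool) : Prop := out = filters_should_expand_limit_py_alt match_filters
instance (match_filters : List (String × Option String)) (out : Bool) : Decidable (Spec_filters_should_expand_limit_py match_filters out) := by unfold Spec_filters_should_expand_limit_py; infer_instance

-- ===== CLAIM (what is proved, stated in full; the proofs are below) =====
def Claim_equal_filters_should_expand_limit_py : Prop := ∀ (match_filters : List (String × Option String)), Dom_filters_should_expand_limit_py match_filters → Spec_filters_should_expand_limit_py match_filters (filters_should_expand_limit_py match_filters)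

-- ===== LEMMAS AND PROOFS =====
theorem pv_any_ofList {α : Type} [DecidableEq α] (xs : List α) (p : α → Bool) :
    (PySem.Set.ofList xs).any p = xs.any p := by
  rw [Bool.eq_iff_iff]; simp [List.any_eq_true, PySem.Set.mem_ofList]

theorem pv_all_ofList {α : Type} [DecidableEq α] (xs : List α) (p : α → Bool) :
    (PySem.Set.ofList xs).all p = xs.all p := by
  rw [Bool.eq_iff_iff]; simp [List.all_eq_true, PySem.Set.mem_ofList]

theorem pv_ofList_eq_nil {α : Type} [DecidableEq α] (xs : List α) :
    (PySem.Set.ofList xs = []) ↔ xs = [] := by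
  constructor
  · intro h
    cases xs with
    | nil => rfl
    | cons a t =>
      exfalso
      have : a ∈ PySem.Set.ofList (a :: t) := by
        rw [PySem.Set.mem_ofList]; exact List.mem_cons_self
      rw [h] at this; exact List.not_mem_nil this
  · intro h; subst h; rfl

-- the rank a key gets from the _RANK table, as an if-chain over the two key classes
theorem pvRank_getD (k : String) :
    pvRank.getD k 1 = (if pvExpandKey k then 2 else if pvWorkflowKey k then 0 else 1) := by
  by_cases h1 : k = "supplier_id"; · subst h1; rfl
  by_cases h2 : k = "rfq_id"; · subst h2; rfl
  by_cases h3 : k = "workflow_id"; · subst h3; rfl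
  by_cases h4 : k = "action_id"; · subst h4; rfl
  by_cases h5 : k = "draft_action_id"; · subst h5; rfl
  by_cases h6 : k = "email_action_id"; · subst h6; rfl
  have h : pvRank = PySem.Dict.mk [("supplier_id", (2 : Int)), ("rfq_id", 2), ("workflow_id", 0),
      ("action_id", 0), ("draft_action_id", 0), ("email_action_id", 0)] := by rfl
  rw [h, PySem.Dict.getD_eq_get?_getD]
  simp only [PySem.Dict.get?_mk_cons, beq_iff_eq]
  rw [if_neg (fun hh => h1 hh.symm), if_neg (fun hh => h2 hh.symm),
      if_neg (fun hh => h3 hh.symm), if_neg (fun hh => h4 hh.symm),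
      if_neg (fun hh => h5 hh.symm), if_neg (fun hh => h6 hh.symm)]
  simp [pvExpandKey, pvWorkflowKey, h1, h2, h3, h4, h5, h6, PySem.Dict.get?]

-- running max of ranks: the accumulator always has the shape (2 / 0 / 1) of (e, w) flags
theorem pv_foldl_rank (t : List String) (e w : Bool) :
    (t.map (fun k => pvRank.getD k 1)).foldl max (if e then 2 else if w then 0 else 1) =
      (if e || t.any pvExpandKey then 2 else if w && t.all pvWorkflowKey then 0 else 1) := by
  induction t generalizing e w with
  | nil => simp
  | cons k rest ih =>
    simp only [List.map_cons, List.foldl_cons, List.any_cons, List.all_cons]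
    rw [pvRank_getD k]
    have hstep : max (if e then 2 else if w then 0 else (1:Int))
        (if pvExpandKey k then 2 else if pvWorkflowKey k then 0 else 1) =
        (if e || pvExpandKey k then 2 else if w && pvWorkflowKey k then 0 else 1) := by
      cases e <;> cases w <;> cases pvExpandKey k <;> cases pvWorkflowKey k <;> simp
    rw [hstep, ih]; simp [Bool.or_assoc, Bool.and_assoc]

-- max(scores) != 1 coincides with "some active key expands, or all active keys are workflow keys"
theorem pv_max_rank_char (a : String) (t : List String) :
    (match PySem.List.max? ((a :: t).map (fun k => pvRank.getD k 1)) (fun x => x) with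
      | some m => m != 1
      | none => false) =
      ((a :: t).any pvExpandKey || (a :: t).all pvWorkflowKey) := by
  simp only [List.map_cons, PySem.List.max?_id_cons, pvRank_getD (k := a)]
  rw [pv_foldl_rank t (pvExpandKey a) (pvWorkflowKey a)]
  simp only [List.any_cons, List.all_cons]
  cases pvExpandKey a <;> cases pvWorkflowKey a <;>
    cases h1 : t.any pvExpandKey <;> cases h2 : t.all pvWorkflowKey <;> simp

-- ===== VERDICT (by name: the statement is the Claim_ definition above) =====
theorem filters_should_expand_limit_py_spec : Claim_equal_filters_should_expand_limit_py := by
  intro match_filters _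
  unfold Spec_filters_should_expand_limit_py filters_should_expand_limit_py
    filters_should_expand_limit_py_alt
  by_cases hnil : match_filters = []
  · simp [hnil]
  · simp only [if_neg hnil]
    set act := (((PySem.Dict.ofList match_filters).items.filter pvActive).map (·.1)) with hact
    have hmap : ((PySem.Dict.ofList match_filters).items.filter pvActive).map
        (fun p => pvRank.getD p.1 1) = act.map (fun k => pvRank.getD k 1) := by
      rw [hact, List.map_map]; rfl
    rw [hmap]
    cases act with
    | nil => simp
    | cons a t =>
      have h1 : ¬ (PySem.Set.ofList (a :: t) = []) := by
        rw [pv_ofList_eq_nil]; simp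
      have h2 : ¬ ((a :: t).map (fun k => pvRank.getD k 1) = []) := by simp
      simp only [if_neg h1, if_neg h2, pv_any_ofList, pv_all_ofList]
      rw [pv_max_rank_char]
      by_cases hany : (a :: t).any pvExpandKey = true
      · simp [hany]
      · rw [Bool.not_eq_true] at hany
        have hne : (PySem.Set.ofList (a :: t)).isEmpty = false := by
          simp [h1]
        simp [hany, hne]
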